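-- pv_equiv track=rewrite | github.com/robertsiegel/SoftDesSp15 | gene_finder/gene_finder.py | rest_of_ORF
-- ===== SOURCE A (Python) =====
-- def rest_of_ORF(dna):
-- 	""" Takes a DNA sequence that is assumed to begin with a start codon and returns
-- 		the sequence up to but not including the first in frame stop codon.  If there
-- 		is no in frame stop codon, returns the whole string.
--
-- 		dna: a DNA sequence
-- 		returns: the open reading frame represented as a string
-- 	>>> rest_of_ORF("ATGTGAA")
-- 	'ATG'
-- 	>>> rest_of_ORF("ATGAGATAGG")
-- 	'ATGAGA'
-- 	"""
-- 	rest_of_ORF = ""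
-- 	for i in range(0, len(dna), 3):
-- 		if dna[i:i+3] in ["TAG", "TAA", "TGA"]:
-- 			break
-- 		else:
-- 			rest_of_ORF += dna[i:i+3]
-- 	return rest_of_ORF
-- ===== SOURCE B (Python) =====
-- STOP_CODONS = ("TAG", "TAA", "TGA")
--
-- def rest_of_ORF(dna):
--     # Scan codon starts only to find the boundary index, then return one slice.
--     k = 0
--     while k < len(dna):
--         if dna[k:k+3] in STOP_CODONS:
--             break
--         k += 3
--     return dna[:k]
-- ===== Notes on version B (the rewrite author's own statement) =====
-- stated objective: simpler
-- what changed: B drops A's codon-by-codon += accumulator: it scans only to find the first in-frame stop codon's index k and returns the single slice dna[:k].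
import Mathlib
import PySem

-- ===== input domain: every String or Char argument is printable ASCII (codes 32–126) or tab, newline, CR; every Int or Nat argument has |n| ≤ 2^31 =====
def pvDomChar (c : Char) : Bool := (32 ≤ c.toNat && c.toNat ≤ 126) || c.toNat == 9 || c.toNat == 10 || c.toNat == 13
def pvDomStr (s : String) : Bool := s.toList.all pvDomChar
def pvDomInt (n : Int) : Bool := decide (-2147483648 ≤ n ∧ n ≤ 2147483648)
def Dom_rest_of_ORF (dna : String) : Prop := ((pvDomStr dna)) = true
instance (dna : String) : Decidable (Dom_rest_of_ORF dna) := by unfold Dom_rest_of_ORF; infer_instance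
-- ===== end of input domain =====

-- B replaces A's codon-by-codon += accumulator by a boundary-index scan plus one final slice (objective: simpler).

-- ===== PORT A =====
def pvStops : List (List Char) := [String.toList "TAG", String.toList "TAA", String.toList "TGA"]

-- A's 'for i in range(0, len(dna), 3)' with break, accumulating acc += dna[i:i+3]
def pvALoop (cs : List Char) (i : Nat) (acc : List Char) : List Char :=
  if i < cs.length then
    let codon := PySem.List.slice cs (some (i : Int)) (some ((i : Int) + 3))
    if pvStops.contains codon then acc
    else pvALoop cs (i + 3) (acc ++ codon)
  else acc
termination_by cs.length - i

def rest_of_ORF (dna : String) : String :=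
  String.ofList (pvALoop dna.toList 0 [])

-- ===== PORT B =====
-- B's 'while k < len(dna): if dna[k:k+3] in STOP_CODONS: break; k += 3', returning the boundary index k
def pvBLoop (cs : List Char) (k : Nat) : Nat :=
  if k < cs.length then
    if pvStops.contains (PySem.List.slice cs (some (k : Int)) (some ((k : Int) + 3))) then k
    else pvBLoop cs (k + 3)
  else k
termination_by cs.length - k

def rest_of_ORF_alt (dna : String) : String :=
  String.ofList (PySem.List.slice dna.toList none (some ((pvBLoop dna.toList 0 : Nat) : Int)))

-- ===== PRECONDITION & SPEC =====
def Spec_rest_of_ORF (dna : String) (out : String) : Prop := out = rest_of_ORF_alt dna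
instance (dna : String) (out : String) : Decidable (Spec_rest_of_ORF dna out) := by unfold Spec_rest_of_ORF; infer_instance

-- ===== CLAIM (what is proved, stated in full; the proofs are below) =====
def Claim_equal_rest_of_ORF : Prop := ∀ (dna : String), Dom_rest_of_ORF dna → Spec_rest_of_ORF dna (rest_of_ORF dna)

-- ===== LEMMAS AND PROOFS =====
lemma pvLoop_eq (cs : List Char) (i : Nat) :
    pvALoop cs i (cs.take i) = cs.take (pvBLoop cs i) := by
  fun_induction pvBLoop cs i with
  | case1 k hlt hstop =>
    unfold pvALoop
    simp only [hlt, if_true, hstop]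
  | case2 k hlt hstop ih =>
    unfold pvALoop
    simp only [hlt, if_true, hstop]
    have hcodon : PySem.List.slice cs (some (k : Int)) (some ((k : Int) + 3))
        = (cs.drop k).take 3 := by
      have := PySem.List.slice_natCast_add cs k 3
      simpa using this
    rw [hcodon, ← List.take_add]
    exact ih
  | case3 k hlt =>
    unfold pvALoop
    simp [hlt]

-- ===== VERDICT (by name: the statement is the Claim_ definition above) =====
theorem rest_of_ORF_spec : Claim_equal_rest_of_ORF := by
  intro dna _
  unfold Spec_rest_of_ORF rest_of_ORF rest_of_ORF_alt
  rw [PySem.List.slice_to_natCast]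
  exact congrArg String.ofList (by simpa using pvLoop_eq dna.toList 0)
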